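-- pv_equiv track=rewrite | github.com/osy9757/codetree-TILs | 231109/Carry 피하기/escaping-carry.py | max_comb
-- ===== SOURCE A (Python) =====
-- from itertools import combinations
--
-- def max_comb(nums, n):
--     for i in range(n,1,-1):
--         for comb in combinations(nums,i):
--             num_list = list(comb)
--             while True:
--                 sum_num = 0
--                 for num in num_list:
--                     sum_num += num%10
--                 if sum_num >= 10:
--                     break
--                 num_list = [num // 10 for num in num_list]
--                 if sum(num_list) == 0:
--                     return len(list(comb))
-- ===== SOURCE B (Python) =====
-- from itertools import combinations
--
-- def digit_sum(x):
--     s = 0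
--     while x > 0:
--         s += x % 10
--         x //= 10
--     return s
--
-- def max_comb(nums, n):
--     for i in range(n, 1, -1):
--         for comb in combinations(nums, i):
--             if digit_sum(sum(comb)) == sum(map(digit_sum, comb)):
--                 return i
--     return None
-- ===== Notes on version B (the rewrite author's own statement) =====
-- stated objective: simpler
-- what changed: The column-by-column %10//10 shifting carry test inside the while loop is replaced by the closed digit-sum invariant: a combination is carry-free iff digit_sum(sum(comb)) equals the sum of the elements' digit sums, so the interleaved shift loop disappears.
-- outside the precondition, e.g. on max_comb([-5, -6], 2): A returns None, B returns 2; on max_comb([-1, 0], 2): A does not finish within the time limit, B returns 2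
import Mathlib
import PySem

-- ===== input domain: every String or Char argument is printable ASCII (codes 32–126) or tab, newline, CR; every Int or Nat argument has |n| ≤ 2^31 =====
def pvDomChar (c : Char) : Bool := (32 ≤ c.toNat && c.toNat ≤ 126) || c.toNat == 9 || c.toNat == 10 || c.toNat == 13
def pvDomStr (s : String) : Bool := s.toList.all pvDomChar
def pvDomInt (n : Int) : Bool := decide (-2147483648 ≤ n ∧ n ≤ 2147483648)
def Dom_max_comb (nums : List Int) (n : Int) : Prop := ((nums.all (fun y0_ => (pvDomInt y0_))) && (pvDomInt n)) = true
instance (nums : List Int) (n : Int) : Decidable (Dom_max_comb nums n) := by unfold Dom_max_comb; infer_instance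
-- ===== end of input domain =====

-- B replaces A's column-by-column %10 // 10 shifting carry test with the closed digit-sum
-- invariant digit_sum(sum(comb)) == sum(digit_sum(x)); objective: simpler.

-- ===== PORT A =====
-- itertools.combinations(l, k): all k-element subsequences in itertools' order (used by both Pythons)
def combos {α : Type} : Nat → List α → List (List α)
  | 0, _ => [[]]
  | _ + 1, [] => []
  | k + 1, x :: xs => (combos k xs).map (x :: ·) ++ combos (k + 1) xs

-- Python sum(lst)
def sumInt (l : List Int) : Int := l.foldl (· + ·) 0

-- A's 'while True' carry loop; true = the 'return len(list(comb))' path, false = the 'break'.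
-- The fuel is only a totality guard: on inputs admitted by Dom ∧ Pre_ (nonnegative ints ≤ 2^31)
-- Python's loop ends within 11 iterations, so fuel 64 is exact there.
def carryLoopA : Nat → List Int → Bool
  | 0, _ => false
  | f + 1, numList =>
    let sumNum := numList.foldl (fun acc num => acc + PySem.Int.mod num 10) 0
    if 10 ≤ sumNum then false
    else
      let numList' := numList.map (fun num => PySem.Int.floordiv num 10)
      if sumInt numList' = 0 then true
      else carryLoopA f numList'

-- the two nested for loops of A: first i in range(n,1,-1) whose combinations contain a
-- carry-free tuple; A returns len(list(comb)) of the first such comb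
def goA (nums : List Int) : List Int → Option Int
  | [] => none
  | i :: rest =>
    match (combos i.toNat nums).find? (fun c => carryLoopA 64 c) with
    | some c => some ((c.length : Int))
    | none => goA nums rest

def max_comb (nums : List Int) (n : Int) : Option Int :=
  goA nums (PySem.List.pyRange n 1 (-1))

-- ===== PORT B =====
-- Source B's digit_sum: while x > 0: s += x % 10; x //= 10
def digitSum (x : Int) : Int :=
  if _h : 0 < x then PySem.Int.mod x 10 + digitSum (PySem.Int.floordiv x 10) else 0
termination_by x.toNat
decreasing_by
  rw [PySem.Int.floordiv_eq_ediv_of_pos (by omega : (0:Int) < 10)]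
  omega

def goB (nums : List Int) : List Int → Option Int
  | [] => none
  | i :: rest =>
    if (combos i.toNat nums).any (fun c => digitSum (sumInt c) == sumInt (c.map digitSum))
    then some i
    else goB nums rest

def max_comb_alt (nums : List Int) (n : Int) : Option Int :=
  goB nums (PySem.List.pyRange n 1 (-1))

-- ===== PRECONDITION & SPEC =====
-- Pre_ excludes inputs holding a negative number (unless n ≤ 1 or fewer than two numbers, where
-- no combination is ever tested): A's %10 // 10 shift loop diverges on some of them (e.g.
-- ([-1, 0], 2)) and where it does return, the result is an artefact of floor arithmetic on negatives.
def Pre_max_comb (nums : List Int) (n : Int) : Prop :=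
  (∀ x ∈ nums, 0 ≤ x) ∨ n ≤ 1 ∨ nums.length ≤ 1
instance (nums : List Int) (n : Int) : Decidable (Pre_max_comb nums n) := by
  unfold Pre_max_comb; infer_instance

def pvWitness_max_comb : List Int × Int := ([12, 34, 5], 3)

def Spec_max_comb (nums : List Int) (n : Int) (out : Option Int) : Prop := out = max_comb_alt nums n
instance (nums : List Int) (n : Int) (out : Option Int) : Decidable (Spec_max_comb nums n out) := by
  unfold Spec_max_comb; infer_instance

-- ===== CLAIM (what is proved, stated in full; the proofs are below) =====
def Claim_equal_max_comb : Prop := ∀ (nums : List Int) (n : Int), Dom_max_comb nums n → Pre_max_comb nums n → Spec_max_comb nums n (max_comb nums n)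

-- ===== LEMMAS AND PROOFS =====

theorem foldl_add_eq (l : List Int) (a : Int) : l.foldl (· + ·) a = a + l.sum := by
  induction l generalizing a with
  | nil => simp
  | cons x xs ih => simp [List.foldl, ih]; ring

theorem sumInt_eq (l : List Int) : sumInt l = l.sum := by
  simp [sumInt, foldl_add_eq]

theorem modfold_eq (l : List Int) :
    l.foldl (fun acc num => acc + PySem.Int.mod num 10) 0
      = (l.map (fun num => PySem.Int.mod num 10)).sum := by
  rw [← List.foldl_map, foldl_add_eq]
  ring

theorem digitSum_zero : digitSum 0 = 0 := by
  rw [digitSum]; simp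

theorem digitSum_step (x : Int) (h : 0 ≤ x) :
    digitSum x = PySem.Int.mod x 10 + digitSum (PySem.Int.floordiv x 10) := by
  rcases eq_or_lt_of_le h with h0 | h0
  · rw [← h0]
    simp [digitSum_zero, PySem.Int.mod, PySem.Int.floordiv]
  · rw [digitSum]; simp [h0]

-- digitSum's recurrence in terms of Lean's Euclidean / and % (equal to Python's for divisor 10)
theorem digitSum_step' (x : Int) (h : 0 ≤ x) : digitSum x = x % 10 + digitSum (x / 10) := by
  rw [digitSum_step x h, PySem.Int.mod_eq_emod_of_pos (by omega),
    PySem.Int.floordiv_eq_ediv_of_pos (by omega)]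

theorem digitSum_small (x : Int) (h0 : 0 ≤ x) (h1 : x < 10) : digitSum x = x := by
  rw [digitSum_step' x h0, (by omega : x % 10 = x), (by omega : x / 10 = 0), digitSum_zero]
  omega

theorem digitSum_le_aux : ∀ m : Nat, ∀ x : Int, x.toNat ≤ m → 0 ≤ x → digitSum x ≤ x := by
  intro m
  induction m with
  | zero => intro x hx h0; rw [(by omega : x = 0), digitSum_zero]
  | succ m ih =>
    intro x hx h0
    by_cases h : x < 10
    · rw [digitSum_small x h0 h]
    · rw [digitSum_step' x h0]
      have h1 := ih (x / 10) (by omega) (by omega)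
      omega

theorem digitSum_le (x : Int) (h : 0 ≤ x) : digitSum x ≤ x :=
  digitSum_le_aux x.toNat x le_rfl h

theorem digitSum_lt (x : Int) (h : 10 ≤ x) : digitSum x < x := by
  rw [digitSum_step' x (by omega)]
  have h1 := digitSum_le (x / 10) (by omega)
  omega

theorem digitSum_add_le_aux : ∀ m : Nat, ∀ a b : Int, 0 ≤ a → 0 ≤ b → (a + b).toNat ≤ m →
    digitSum (a + b) ≤ digitSum a + digitSum b := by
  intro m
  induction m with
  | zero =>
    intro a b ha hb hm
    rw [(by omega : a = 0), (by omega : b = 0)]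
    simp [digitSum_zero]
  | succ m ih =>
    intro a b ha hb hm
    rcases eq_or_lt_of_le (by omega : (0:Int) ≤ a + b) with h0 | h0
    · rw [(by omega : a = 0), (by omega : b = 0)]
      simp [digitSum_zero]
    · rw [digitSum_step' (a + b) (by omega), digitSum_step' a ha, digitSum_step' b hb]
      by_cases hc : a % 10 + b % 10 < 10
      · rw [(by omega : (a + b) % 10 = a % 10 + b % 10),
          (by omega : (a + b) / 10 = a / 10 + b / 10)]
        have k := ih (a / 10) (b / 10) (by omega) (by omega) (by omega)
        omega
      · rw [(by omega : (a + b) % 10 = a % 10 + b % 10 - 10),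
          (by omega : (a + b) / 10 = a / 10 + b / 10 + 1)]
        have hab10 : (10:Int) ≤ a + b := by omega
        have k1 := ih (a / 10 + b / 10) 1 (by omega) (by omega) (by omega)
        have k2 := ih (a / 10) (b / 10) (by omega) (by omega) (by omega)
        have d1 : digitSum 1 = 1 := digitSum_small 1 (by omega) (by omega)
        omega

theorem digitSum_add_le (a b : Int) (ha : 0 ≤ a) (hb : 0 ≤ b) :
    digitSum (a + b) ≤ digitSum a + digitSum b :=
  digitSum_add_le_aux (a + b).toNat a b ha hb le_rfl

theorem digitSum_r_add_ten_mul (r s : Int) (hr0 : 0 ≤ r) (hr : r < 10) (hs : 0 ≤ s) :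
    digitSum (r + 10 * s) = r + digitSum s := by
  rw [digitSum_step' (r + 10 * s) (by omega),
    (by omega : (r + 10 * s) % 10 = r), (by omega : (r + 10 * s) / 10 = s)]

theorem digitSum_ten_mul (s : Int) (hs : 0 ≤ s) : digitSum (10 * s) = digitSum s := by
  have := digitSum_r_add_ten_mul 0 s le_rfl (by omega) hs
  simpa [digitSum_zero] using this

theorem sum_nonneg_int (l : List Int) (h : ∀ x ∈ l, 0 ≤ x) : 0 ≤ l.sum := by
  induction l with
  | nil => simp
  | cons x xs ih =>
    have := h x (by simp)
    have := ih (fun y hy => h y (by simp [hy]))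
    simp only [List.sum_cons]
    omega

theorem sum_zero_all_zero (l : List Int) (h : ∀ x ∈ l, 0 ≤ x) (hs : l.sum = 0) :
    ∀ x ∈ l, x = 0 := by
  induction l with
  | nil => simp
  | cons x xs ih =>
    have h1 := h x (by simp)
    have h2 : ∀ y ∈ xs, 0 ≤ y := fun y hy => h y (by simp [hy])
    have h3 := sum_nonneg_int xs h2
    simp only [List.sum_cons] at hs
    intro y hy
    rcases List.mem_cons.mp hy with rfl | hy'
    · omega
    · exact ih h2 (by omega) y hy'

theorem digitSum_sum_le (l : List Int) (h : ∀ x ∈ l, 0 ≤ x) :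
    digitSum l.sum ≤ (l.map digitSum).sum := by
  induction l with
  | nil => simp [digitSum_zero]
  | cons x xs ih =>
    have h1 := h x (by simp)
    have h2 : ∀ y ∈ xs, 0 ≤ y := fun y hy => h y (by simp [hy])
    have h3 := sum_nonneg_int xs h2
    have h4 := digitSum_add_le x xs.sum h1 h3
    have h5 := ih h2
    simp only [List.sum_cons, List.map_cons]
    omega

-- l.sum and (map digitSum l).sum split into the last-digit column and the shifted list
theorem sum_decomp (l : List Int) :
    l.sum = (l.map (fun x => x % 10)).sum + 10 * (l.map (fun x => x / 10)).sum := by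
  induction l with
  | nil => simp
  | cons x xs ih =>
    simp only [List.map_cons, List.sum_cons]
    omega

theorem ds_decomp (l : List Int) (h : ∀ x ∈ l, 0 ≤ x) :
    (l.map digitSum).sum
      = (l.map (fun x => x % 10)).sum + ((l.map (fun x => x / 10)).map digitSum).sum := by
  induction l with
  | nil => simp
  | cons x xs ih =>
    have h1 := h x (by simp)
    have h2 : ∀ y ∈ xs, 0 ≤ y := fun y hy => h y (by simp [hy])
    simp only [List.map_cons, List.sum_cons, ih h2, digitSum_step' x h1]
    ring

-- the heart: A's shift loop agrees with B's digit-sum test on nonneg small ints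
-- rewrite A's loop body's PySem arithmetic into Euclidean / and % (equal for divisor 10)
theorem modfold_eq' (l : List Int) :
    l.foldl (fun acc num => acc + PySem.Int.mod num 10) 0 = (l.map (fun x => x % 10)).sum := by
  rw [modfold_eq]
  congr 1
  exact List.map_congr_left fun x _ => PySem.Int.mod_eq_emod_of_pos (by omega)

theorem shift_eq (l : List Int) :
    l.map (fun num => PySem.Int.floordiv num 10) = l.map (fun x => x / 10) := by
  exact List.map_congr_left fun x _ => PySem.Int.floordiv_eq_ediv_of_pos (by omega)

theorem carryLoopA_succ (f : Nat) (l : List Int) :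
    carryLoopA (f + 1) l =
      (if 10 ≤ l.foldl (fun acc num => acc + PySem.Int.mod num 10) 0 then false
       else if sumInt (l.map (fun num => PySem.Int.floordiv num 10)) = 0 then true
       else carryLoopA f (l.map (fun num => PySem.Int.floordiv num 10))) := rfl

-- the heart: A's shift loop agrees with B's digit-sum test on nonneg small ints
theorem loop_iff (f : Nat) (l : List Int) (h : ∀ x ∈ l, 0 ≤ x ∧ x < (10 : Int) ^ f) :
    carryLoopA (f + 1) l = (digitSum l.sum == (l.map digitSum).sum) := by
  induction f generalizing l with
  | zero =>
    have hz : ∀ x ∈ l, x = 0 := by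
      intro x hx
      have := h x hx
      simp at this
      omega
    have hsum : l.sum = 0 := List.sum_eq_zero hz
    have hmapsum : (l.map digitSum).sum = 0 := List.sum_eq_zero (by
      intro y hy; rcases List.mem_map.mp hy with ⟨x, hx, rfl⟩; rw [hz x hx, digitSum_zero])
    have hr : (l.map (fun x => x % 10)).sum = 0 := List.sum_eq_zero (by
      intro y hy; rcases List.mem_map.mp hy with ⟨x, hx, rfl⟩; rw [hz x hx]; simp)
    have hs : (l.map (fun x => x / 10)).sum = 0 := List.sum_eq_zero (by
      intro y hy; rcases List.mem_map.mp hy with ⟨x, hx, rfl⟩; rw [hz x hx]; simp)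
    rw [carryLoopA_succ, modfold_eq', shift_eq, sumInt_eq, hr, hs, hsum, hmapsum, digitSum_zero]
    norm_num
  | succ g ih =>
    have h0 : ∀ x ∈ l, 0 ≤ x := fun x hx => (h x hx).1
    have hr0 : ∀ y ∈ l.map (fun x => x % 10), 0 ≤ y := by
      intro y hy; rcases List.mem_map.mp hy with ⟨x, hx, rfl⟩; omega
    have hs0 : ∀ y ∈ l.map (fun x => x / 10), 0 ≤ y := by
      intro y hy; rcases List.mem_map.mp hy with ⟨x, hx, rfl⟩
      have := h0 x hx; positivity
    have hrn := sum_nonneg_int _ hr0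
    have hsn := sum_nonneg_int _ hs0
    have hsumd := sum_decomp l
    have hdsd := ds_decomp l h0
    rw [carryLoopA_succ, modfold_eq', shift_eq, sumInt_eq]
    by_cases hbig : 10 ≤ (l.map (fun x => x % 10)).sum
    · rw [if_pos hbig]
      have hlt : digitSum l.sum < (l.map digitSum).sum := by
        calc digitSum l.sum
            = digitSum ((l.map (fun x => x % 10)).sum + 10 * (l.map (fun x => x / 10)).sum) := by
              rw [← hsumd]
          _ ≤ digitSum (l.map (fun x => x % 10)).sum
                + digitSum (10 * (l.map (fun x => x / 10)).sum) :=
              digitSum_add_le _ _ hrn (by omega)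
          _ = digitSum (l.map (fun x => x % 10)).sum + digitSum (l.map (fun x => x / 10)).sum := by
              rw [digitSum_ten_mul _ hsn]
          _ < (l.map (fun x => x % 10)).sum + digitSum (l.map (fun x => x / 10)).sum := by
              have := digitSum_lt _ hbig
              omega
          _ ≤ (l.map (fun x => x % 10)).sum + ((l.map (fun x => x / 10)).map digitSum).sum := by
              have := digitSum_sum_le _ hs0
              omega
          _ = (l.map digitSum).sum := hdsd.symm
      rw [eq_comm, beq_eq_false_iff_ne]
      omega
    · rw [if_neg hbig]
      have hds : digitSum l.sum
          = (l.map (fun x => x % 10)).sum + digitSum (l.map (fun x => x / 10)).sum := by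
        rw [hsumd]
        exact digitSum_r_add_ten_mul _ _ hrn (by omega) hsn
      by_cases hz : (l.map (fun x => x / 10)).sum = 0
      · rw [if_pos hz]
        have hall := sum_zero_all_zero _ hs0 hz
        have hmds : ((l.map (fun x => x / 10)).map digitSum).sum = 0 := by
          apply List.sum_eq_zero
          intro y hy
          rcases List.mem_map.mp hy with ⟨x, hx, rfl⟩
          rw [hall x hx, digitSum_zero]
        rw [hds, hdsd, hz, digitSum_zero, hmds]
        simp
      · rw [if_neg hz]
        have hbound : ∀ x ∈ l.map (fun x => x / 10), 0 ≤ x ∧ x < (10 : Int) ^ g := by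
          intro y hy
          rcases List.mem_map.mp hy with ⟨x, hx, rfl⟩
          have hx1 := h x hx
          have hpow : (10:Int) ^ (g + 1) = 10 ^ g * 10 := by ring
          rw [hpow] at hx1
          generalize (10:Int) ^ g = t at hx1 ⊢
          constructor
          · omega
          · omega
        rw [ih _ hbound, hds, hdsd]
        simp

theorem combos_subset {α : Type} (k : Nat) (l : List α) (c : List α) (hc : c ∈ combos k l) :
    ∀ x ∈ c, x ∈ l := by
  induction l generalizing k c with
  | nil =>
    cases k with
    | zero => simp [combos] at hc; simp [hc]
    | succ k => simp [combos] at hc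
  | cons y ys ih =>
    cases k with
    | zero => simp [combos] at hc; simp [hc]
    | succ k =>
      simp only [combos, List.mem_append, List.mem_map] at hc
      rcases hc with ⟨c', hc', rfl⟩ | hc'
      · intro x hx
        rcases List.mem_cons.mp hx with rfl | hx'
        · simp
        · exact List.mem_cons_of_mem y (ih k c' hc' x hx')
      · intro x hx
        exact List.mem_cons_of_mem y (ih (k + 1) c hc' x hx)

theorem combos_length {α : Type} (k : Nat) (l : List α) (c : List α) (hc : c ∈ combos k l) :
    c.length = k := by
  induction l generalizing k c with
  | nil =>
    cases k with
    | zero => simp [combos] at hc; simp [hc]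
    | succ k => simp [combos] at hc
  | cons y ys ih =>
    cases k with
    | zero => simp [combos] at hc; simp [hc]
    | succ k =>
      simp only [combos, List.mem_append, List.mem_map] at hc
      rcases hc with ⟨c', hc', rfl⟩ | hc'
      · simp [ih k c' hc']
      · exact ih (k + 1) c hc'

theorem combos_nil {α : Type} (k : Nat) (l : List α) (h : l.length < k) :
    combos k l = [] := by
  induction l generalizing k with
  | nil =>
    cases k with
    | zero => simp at h
    | succ k => rfl
  | cons y ys ih =>
    cases k with
    | zero => simp at h
    | succ k =>
      simp only [List.length_cons] at h
      simp only [combos, ih k (by omega), ih (k + 1) (by omega), List.map_nil, List.append_nil]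

theorem go_eq (nums : List Int) (L : List Int)
    (hL : ∀ i ∈ L, 1 < i)
    (hdom : ∀ x ∈ nums, x ≤ 2147483648)
    (hpre : (∀ x ∈ nums, 0 ≤ x) ∨ nums.length ≤ 1) :
    goA nums L = goB nums L := by
  induction L with
  | nil => rfl
  | cons i rest ihL =>
    have hi : 1 < i := hL i (by simp)
    have ihL' := ihL fun j hj => hL j (by simp [hj])
    rcases hpre with hnn | hlen
    · -- pointwise agreement of the two carry tests on every combination
      have hpt : ∀ c ∈ combos i.toNat nums,
          carryLoopA 64 c = (digitSum (sumInt c) == sumInt (c.map digitSum)) := by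
        intro c hc
        have hcsub := combos_subset _ _ _ hc
        have hb : ∀ x ∈ c, 0 ≤ x ∧ x < (10 : Int) ^ 63 := by
          intro x hx
          refine ⟨hnn x (hcsub x hx), ?_⟩
          have h1 := hdom x (hcsub x hx)
          have h2 : (2147483648 : Int) < 10 ^ 63 := by norm_num
          omega
        rw [sumInt_eq, sumInt_eq]
        exact loop_iff 63 c hb
      simp only [goA, goB]
      cases hfind : (combos i.toNat nums).find? (fun c => carryLoopA 64 c) with
      | some c =>
        have hcmem := List.mem_of_find?_eq_some hfind
        have hcp : carryLoopA 64 c = true := List.find?_some hfind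
        have hany : (combos i.toNat nums).any
            (fun c => digitSum (sumInt c) == sumInt (c.map digitSum)) = true :=
          List.any_eq_true.mpr ⟨c, hcmem, by rw [← hpt c hcmem]; exact hcp⟩
        simp only [hany, if_pos]
        have hlen := combos_length _ _ _ hcmem
        have : (c.length : Int) = i := by omega
        rw [this]
      | none =>
        have hnone := List.find?_eq_none.mp hfind
        have hany : (combos i.toNat nums).any
            (fun c => digitSum (sumInt c) == sumInt (c.map digitSum)) = false :=
          List.any_eq_false.mpr fun c hc => by
            rw [← hpt c hc]
            simpa using hnone c hc
        simp only [hany, Bool.false_eq_true, if_false]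
        exact ihL'
    · have hcnil : combos i.toNat nums = [] := combos_nil _ _ (by omega)
      simp only [goA, goB, hcnil, List.find?_nil, List.any_nil, Bool.false_eq_true, if_false]
      exact ihL'

theorem range_mem_gt (n i : Int) (h : i ∈ PySem.List.pyRange n 1 (-1)) : 1 < i := by
  have := (PySem.List.mem_pyRange_neg_one).mp h
  omega

-- ===== VERDICT (by name: the statement is the Claim_ definition above) =====
theorem max_comb_spec : Claim_equal_max_comb := by
  intro nums n hdom hpre
  unfold Spec_max_comb max_comb max_comb_alt
  have hdom' : ∀ x ∈ nums, x ≤ 2147483648 := by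
    intro x hx
    simp only [Dom_max_comb, Bool.and_eq_true, List.all_eq_true] at hdom
    have := hdom.1 x hx
    simp [pvDomInt] at this
    omega
  rcases hpre with hpre | hn | hlen
  · exact go_eq nums _ (range_mem_gt n) hdom' (Or.inl hpre)
  · rw [PySem.List.pyRange_neg_one_eq_nil (by omega)]
    simp [goA, goB]
  · exact go_eq nums _ (range_mem_gt n) hdom' (Or.inr hlen)
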